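-- pv_equiv track=rewrite | github.com/k-muro/sniping_arrow_web | board_logic/board.py | create_position_sequence
-- ===== SOURCE A (Python) =====
-- def create_position_sequence(matrix):
--     """
--     Creates a sequence of number-alphabet pairs from the matrix
--
--     Args:
--         matrix (list): 2D matrix containing the characters
--
--     Returns:
--         str: Formatted sequence of number-alphabet pairs
--     """
--     # First reorder the matrix as before
--     rows = len(matrix)
--     cols = len(matrix[0])
--     elements = []
--     for row in range(rows):
--         for col in range(cols):
--             index = col * rows + (rows - 1 - row)
--             elements.append((index, matrix[row][col]))
--
--     # Sort by index to get the correct order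
--     elements.sort(key=lambda x: x[0])
--     ordered_list = [elem[1] for elem in elements]
--     # Find positions of target characters
--     positions = []
--     for id,i in enumerate(ordered_list):
--         try:
--             a=int(i)
--             i="("+i+")"
--         except:pass
--         if i!="":
--
--             positions.append((i,id))
--
--     ordered_chars = sorted(positions, key=lambda x: x[1])
--     sequence = []
--
--     # First character gets its absolute position
--     if ordered_chars:
--         first_char = ordered_chars[0]
--         sequence.append(f"{first_char[0]}{first_char[1]}")
--
--         # For subsequent characters, calculate the difference
--         for i in range(1, len(ordered_chars)):
--             current_char = ordered_chars[i][0]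
--             prev_pos = ordered_chars[i-1][1]
--             current_pos = ordered_chars[i][1]
--             diff = current_pos - prev_pos
--             sequence.append(f"{current_char}{diff}")
--
--     return "".join(sequence)
-- ===== SOURCE B (Python) =====
-- def create_position_sequence(matrix):
--     """Single pass: invert the index permutation and read the matrix directly in
--     target order, emitting each pair on the fly (no intermediate lists, no sort)."""
--     rows = len(matrix)
--     cols = len(matrix[0])
--     parts = []
--     prev = None
--     for k in range(rows * cols):
--         ch = matrix[rows - 1 - k % rows][k // rows]
--         try:
--             int(ch)
--             ch = "(" + ch + ")"
--         except ValueError: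
--             pass
--         if ch != "":
--             parts.append(ch + str(k if prev is None else k - prev))
--             prev = k
--     return "".join(parts)
-- ===== Notes on version B (the rewrite author's own statement) =====
-- stated objective: alternative
-- what changed: B inverts the index bijection and reads each cell directly in target order in one fused pass (matrix[rows-1-k%rows][k//rows]), emitting each formatted pair on the fly with a running prev position, instead of A's build-(index,char)-pairs, sort, enumerate-filter, second sort and indexed diff loop.
import Mathlib
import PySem

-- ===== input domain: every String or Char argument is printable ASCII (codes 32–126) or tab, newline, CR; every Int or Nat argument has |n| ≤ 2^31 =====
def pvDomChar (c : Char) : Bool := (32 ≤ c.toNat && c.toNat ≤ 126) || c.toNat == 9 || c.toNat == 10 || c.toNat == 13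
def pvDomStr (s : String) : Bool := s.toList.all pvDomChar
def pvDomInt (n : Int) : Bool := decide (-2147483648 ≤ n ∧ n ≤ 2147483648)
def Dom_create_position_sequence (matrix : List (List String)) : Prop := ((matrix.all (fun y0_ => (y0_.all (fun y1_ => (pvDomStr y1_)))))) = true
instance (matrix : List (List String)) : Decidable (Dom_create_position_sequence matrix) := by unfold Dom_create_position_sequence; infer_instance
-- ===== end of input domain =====

-- ===== PORT A =====
-- B reads the matrix directly in permuted order in one pass; A builds (index,char) pairs,
-- sorts them, filter-enumerates and diffs in a second indexed loop. Proved equal on Pre_.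

-- the shared try: int(i); i = "("+i+")" except: pass block (identical lines in both Pythons)
def pvWrap (s : String) : String :=
  match PySem.Int.ofStr? s with
  | some _ => "(" ++ s ++ ")"
  | none => s

def pvA_elements (matrix : List (List String)) : List (Int × String) :=
  let rows : Int := (matrix.length : Int)
  let cols : Int := ((PySem.List.pyGetD matrix 0 []).length : Int)
  (PySem.List.pyRange 0 rows 1).foldl (fun acc row =>
    (PySem.List.pyRange 0 cols 1).foldl (fun acc2 col =>
      acc2 ++ [(col * rows + (rows - 1 - row),
                PySem.List.pyGetD (PySem.List.pyGetD matrix row []) col "")]) acc) []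

def pvA_positions (matrix : List (List String)) : List (String × Int) :=
  let ordered_list := (PySem.List.sorted (pvA_elements matrix) (fun e => e.1) false).map (fun e => e.2)
  (PySem.List.enumerate ordered_list 0).foldl (fun acc p =>
    let i := pvWrap p.2
    if i ≠ "" then acc ++ [(i, p.1)] else acc) []

def create_position_sequence (matrix : List (List String)) : String :=
  let ordered_chars := PySem.List.sorted (pvA_positions matrix) (fun p => p.2) false
  if ordered_chars.isEmpty then PySem.Str.join "" []
  else
    let first := PySem.List.pyGetD ordered_chars 0 ("", 0)
    let seq := (PySem.List.pyRange 1 (ordered_chars.length : Int) 1).foldl (fun seq i =>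
      seq ++ [(PySem.List.pyGetD ordered_chars i ("", 0)).1 ++
              PySem.Int.toStr ((PySem.List.pyGetD ordered_chars i ("", 0)).2
                - (PySem.List.pyGetD ordered_chars (i - 1) ("", 0)).2)])
      [first.1 ++ PySem.Int.toStr first.2]
    PySem.Str.join "" seq

-- ===== PORT B =====
def pvB_cell (matrix : List (List String)) (rows : Int) (k : Int) : String :=
  PySem.List.pyGetD (PySem.List.pyGetD matrix (rows - 1 - PySem.Int.mod k rows) [])
    (PySem.Int.floordiv k rows) ""

def pvB_step (matrix : List (List String)) (rows : Int)
    (st : List String × Option Int) (k : Int) : List String × Option Int :=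
  let ch := pvWrap (pvB_cell matrix rows k)
  if ch ≠ "" then
    (st.1 ++ [ch ++ PySem.Int.toStr (match st.2 with | none => k | some p => k - p)], some k)
  else st

def create_position_sequence_alt (matrix : List (List String)) : String :=
  let rows : Int := (matrix.length : Int)
  let cols : Int := ((PySem.List.pyGetD matrix 0 []).length : Int)
  PySem.Str.join ""
    ((PySem.List.pyRange 0 (rows * cols) 1).foldl (pvB_step matrix rows)
      (([] : List String), (none : Option Int))).1

-- ===== PRECONDITION & SPEC =====
-- Pre_ excludes exactly the inputs on which the Python raises IndexError: the empty matrix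
-- (matrix[0]) and matrices having a row shorter than the first row (matrix[row][col]).
def Pre_create_position_sequence (matrix : List (List String)) : Prop :=
  matrix ≠ [] ∧ ∀ row ∈ matrix, (PySem.List.pyGetD matrix 0 []).length ≤ row.length
instance (matrix : List (List String)) : Decidable (Pre_create_position_sequence matrix) := by
  unfold Pre_create_position_sequence; infer_instance
def pvWitness_create_position_sequence : List (List String) := [["a", ""], ["7", "b"]]
def Spec_create_position_sequence (matrix : List (List String)) (out : String) : Prop := out = create_position_sequence_alt matrix
instance (matrix : List (List String)) (out : String) : Decidable (Spec_create_position_sequence matrix out) := by unfold Spec_create_position_sequence; infer_instance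

-- ===== CLAIM (what is proved, stated in full; the proofs are below) =====
def Claim_equal_create_position_sequence : Prop := ∀ (matrix : List (List String)), Dom_create_position_sequence matrix → Pre_create_position_sequence matrix → Spec_create_position_sequence matrix (create_position_sequence matrix)

-- ===== LEMMAS AND PROOFS =====

-- positions of the non-empty (wrapped) chars, with their running cell index
def pvPos : List String → Int → List (String × Int)
  | [], _ => []
  | c :: cs, s => if pvWrap c ≠ "" then (pvWrap c, s) :: pvPos cs (s + 1) else pvPos cs (s + 1)

-- render a positions list: first entry absolute (prev = none), later ones as diffs
def pvRender : List (String × Int) → Option Int → List String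
  | [], _ => []
  | p :: t, none => (p.1 ++ PySem.Int.toStr p.2) :: pvRender t (some p.2)
  | p :: t, some q => (p.1 ++ PySem.Int.toStr (p.2 - q)) :: pvRender t (some p.2)

-- what B's fused loop emits, and its final prev state
def pvEmit : List String → Int → Option Int → List String
  | [], _, _ => []
  | c :: cs, s, prev =>
    if pvWrap c ≠ "" then
      (pvWrap c ++ PySem.Int.toStr (match prev with | none => s | some p => s - p))
        :: pvEmit cs (s + 1) (some s)
    else pvEmit cs (s + 1) prev

def pvFinPrev : List String → Int → Option Int → Option Int
  | [], _, prev => prev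
  | c :: cs, s, prev =>
    if pvWrap c ≠ "" then pvFinPrev cs (s + 1) (some s) else pvFinPrev cs (s + 1) prev

theorem pvEmit_eq_render (cs : List String) : ∀ (s : Int) (prev : Option Int),
    pvEmit cs s prev = pvRender (pvPos cs s) prev := by
  induction cs with
  | nil => intro s prev; rfl
  | cons c cs ih =>
    intro s prev
    by_cases h : pvWrap c = ""
    · simp [pvEmit, pvPos, h, ih]
    · cases prev <;> simp [pvEmit, pvPos, h, ih, pvRender]

-- B's fold over the enumerated char list produces pvEmit
theorem pvB_enum_fold (cs : List String) : ∀ (s : Int) (acc : List String) (prev : Option Int),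
    (PySem.List.enumerate cs s).foldl
      (fun (st : List String × Option Int) (p : Int × String) =>
        if pvWrap p.2 = "" then st
        else
          (st.1 ++ [pvWrap p.2 ++
              PySem.Int.toStr (match st.2 with | none => p.1 | some q => p.1 - q)],
           some p.1)) (acc, prev)
    = (acc ++ pvEmit cs s prev, pvFinPrev cs s prev) := by
  induction cs with
  | nil => intro s acc prev; simp [PySem.List.enumerate_nil, pvEmit, pvFinPrev]
  | cons c cs ih =>
    intro s acc prev
    rw [PySem.List.enumerate_cons, List.foldl_cons]
    by_cases h : pvWrap c = ""
    · simp [pvEmit, pvFinPrev, h, ih]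
    · cases prev <;> simp [pvEmit, pvFinPrev, h, ih]

-- A's positions fold produces pvPos
theorem pvA_pos_fold (cs : List String) : ∀ (s : Int) (acc : List (String × Int)),
    (PySem.List.enumerate cs s).foldl
      (fun acc (p : Int × String) =>
        if pvWrap p.2 = "" then acc else acc ++ [(pvWrap p.2, p.1)]) acc
    = acc ++ pvPos cs s := by
  induction cs with
  | nil => intro s acc; simp [PySem.List.enumerate_nil, pvPos]
  | cons c cs ih =>
    intro s acc
    rw [PySem.List.enumerate_cons, List.foldl_cons]
    by_cases h : pvWrap c = ""
    · rw [if_pos h, ih, pvPos]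
      simp [h]
    · rw [if_neg h, ih, pvPos]
      simp [h]

theorem pvPos_lb (cs : List String) : ∀ (s : Int), ∀ p ∈ pvPos cs s, s ≤ p.2 := by
  induction cs with
  | nil => intro s p hp; simp [pvPos] at hp
  | cons c cs ih =>
    intro s p hp
    rw [pvPos] at hp
    by_cases h : pvWrap c = ""
    · rw [if_neg (by simp [h])] at hp
      have := ih (s + 1) p hp
      omega
    · rw [if_pos (by simp [h])] at hp
      rcases List.mem_cons.mp hp with h1 | h2
      · simp [h1]
      · have := ih (s + 1) p h2; omega

theorem pvPos_pairwise (cs : List String) : ∀ (s : Int),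
    (pvPos cs s).Pairwise (fun a b => a.2 ≤ b.2) := by
  induction cs with
  | nil => intro s; simp [pvPos]
  | cons c cs ih =>
    intro s
    rw [pvPos]
    by_cases h : pvWrap c = ""
    · rw [if_neg (by simp [h])]
      exact ih (s + 1)
    · rw [if_pos (by simp [h])]
      refine List.Pairwise.cons ?_ (ih (s + 1))
      intro b hb
      have := pvPos_lb cs (s + 1) b hb
      simp only []
      omega

-- A's indexed diff loop over p :: t renders t relative to p (Nat-indexed form)
theorem pvChain (d : String × Int) (t : List (String × Int)) : ∀ (a : String × Int),
    (List.range t.length).map (fun k =>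
        ((a :: t).getD (k + 1) d).1 ++
        PySem.Int.toStr (((a :: t).getD (k + 1) d).2 - ((a :: t).getD k d).2))
    = pvRender t (some a.2) := by
  induction t with
  | nil => intro a; simp [pvRender]
  | cons b t ih =>
    intro a
    rw [List.length_cons, List.range_succ_eq_map, List.map_cons, List.map_map]
    have htail :
        (List.range t.length).map ((fun k =>
            ((a :: b :: t).getD (k + 1) d).1 ++
            PySem.Int.toStr (((a :: b :: t).getD (k + 1) d).2 - ((a :: b :: t).getD k d).2))
          ∘ Nat.succ)
        = (List.range t.length).map (fun k =>
            ((b :: t).getD (k + 1) d).1 ++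
            PySem.Int.toStr (((b :: t).getD (k + 1) d).2 - ((b :: t).getD k d).2)) := by
      refine List.map_congr_left ?_
      intro k _
      simp [Function.comp, Nat.succ_eq_add_one]
    rw [htail, ih b]
    simp [pvRender]

-- key arithmetic of the index bijection
theorem pv_mod_key (rows c t : Int) (hr : 0 < rows) (ht0 : 0 ≤ t) (ht1 : t < rows) :
    PySem.Int.mod (c * rows + t) rows = t := by
  rw [PySem.Int.mod_eq_emod_of_pos hr]
  have h : c * rows + t = t + c * rows := by ring
  rw [h, Int.add_mul_emod_self_right t c rows, Int.emod_eq_of_lt ht0 ht1]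

theorem pv_div_key (rows c t : Int) (hr : 0 < rows) (ht0 : 0 ≤ t) (ht1 : t < rows) :
    PySem.Int.floordiv (c * rows + t) rows = c := by
  rw [PySem.Int.floordiv_eq_ediv_of_pos hr]
  have h : c * rows + t = t + c * rows := by ring
  rw [h, Int.add_mul_ediv_right t c (by omega : rows ≠ 0),
      Int.ediv_eq_zero_of_lt ht0 ht1, zero_add]

-- A's nested element loop as a flatMap
theorem pvA_elements_flatMap (matrix : List (List String)) :
    pvA_elements matrix
    = (PySem.List.pyRange 0 (matrix.length : Int) 1).flatMap (fun r =>
        (PySem.List.pyRange 0 ((PySem.List.pyGetD matrix 0 []).length : Int) 1).map (fun c =>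
          (c * (matrix.length : Int) + ((matrix.length : Int) - 1 - r),
           PySem.List.pyGetD (PySem.List.pyGetD matrix r []) c ""))) := by
  show (PySem.List.pyRange 0 (matrix.length : Int) 1).foldl (fun acc row =>
      (PySem.List.pyRange 0 ((PySem.List.pyGetD matrix 0 []).length : Int) 1).foldl
        (fun acc2 col => acc2 ++ [(col * (matrix.length : Int) + ((matrix.length : Int) - 1 - row),
          PySem.List.pyGetD (PySem.List.pyGetD matrix row []) col "")]) acc) [] = _
  have h : (fun (acc : List (Int × String)) (row : Int) =>
      (PySem.List.pyRange 0 ((PySem.List.pyGetD matrix 0 []).length : Int) 1).foldl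
        (fun acc2 col => acc2 ++ [(col * (matrix.length : Int) + ((matrix.length : Int) - 1 - row),
          PySem.List.pyGetD (PySem.List.pyGetD matrix row []) col "")]) acc)
      = (fun acc row => acc ++
          (PySem.List.pyRange 0 ((PySem.List.pyGetD matrix 0 []).length : Int) 1).map (fun col =>
            (col * (matrix.length : Int) + ((matrix.length : Int) - 1 - row),
             PySem.List.pyGetD (PySem.List.pyGetD matrix row []) col ""))) := by
    funext acc row
    exact PySem.List.foldl_append_singleton_eq_map _ _ _
  rw [h, PySem.List.foldl_append_eq_flatMap, List.nil_append]

-- sorting A's element pairs yields the direct-read order of B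
theorem pv_sorted_elements (matrix : List (List String)) (hne : matrix ≠ []) :
    PySem.List.sorted (pvA_elements matrix) (fun e => e.1) false
    = (PySem.List.pyRange 0 ((matrix.length : Int) * ((PySem.List.pyGetD matrix 0 []).length : Int)) 1).map
        (fun k => (k, pvB_cell matrix (matrix.length : Int) k)) := by
  set rows : Int := (matrix.length : Int) with hrows
  set cols : Int := ((PySem.List.pyGetD matrix 0 []).length : Int) with hcols
  have hr : 0 < rows := by
    have : matrix.length ≠ 0 := fun h => hne (List.length_eq_zero_iff.mp h)
    omega
  set L := (PySem.List.pyRange 0 (rows * cols) 1).map (fun k => (k, pvB_cell matrix rows k)) with hL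
  refine PySem.List.sorted_eq_of_perm_of_pairwise_lt _ _ (fun e : Int × String => e.1) ?_ ?_
  · -- L.Perm (pvA_elements matrix)
    rw [pvA_elements_flatMap]
    have ndL : L.Nodup := by
      refine List.Nodup.map ?_ (PySem.List.nodup_pyRange_one 0 (rows * cols))
      intro a b h
      exact congrArg Prod.fst h
    have ndE : ((PySem.List.pyRange 0 rows 1).flatMap (fun r =>
        (PySem.List.pyRange 0 cols 1).map (fun c =>
          (c * rows + (rows - 1 - r),
           PySem.List.pyGetD (PySem.List.pyGetD matrix r []) c "")))).Nodup := by
      refine List.Nodup.of_map Prod.fst ?_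
      rw [List.map_flatMap, List.nodup_flatMap]
      constructor
      · intro r _
        rw [List.map_map]
        refine List.Nodup.map ?_ (PySem.List.nodup_pyRange_one 0 cols)
        intro c1 c2 h
        simp only [Function.comp_apply] at h
        have h' : c1 * rows = c2 * rows := by omega
        exact mul_right_cancel₀ (by omega : rows ≠ 0) h'
      · refine (PySem.List.pairwise_lt_pyRange_one 0 rows).imp_of_mem ?_
        intro r r' hrm hrm' hlt
        rw [PySem.List.mem_pyRange_one] at hrm hrm'
        intro x hx hx'
        simp only [List.map_map, List.mem_map, Function.comp_apply] at hx hx'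
        obtain ⟨c, hc, rfl⟩ := hx
        obtain ⟨c', hc', he⟩ := hx'
        rw [PySem.List.mem_pyRange_one] at hc hc'
        have m1 : PySem.Int.mod (c * rows + (rows - 1 - r)) rows = rows - 1 - r :=
          pv_mod_key rows c _ hr (by omega) (by omega)
        have m2 : PySem.Int.mod (c' * rows + (rows - 1 - r')) rows = rows - 1 - r' :=
          pv_mod_key rows c' _ hr (by omega) (by omega)
        rw [he] at m2
        omega
    refine (List.perm_ext_iff_of_nodup ndL ndE).mpr ?_
    intro p
    simp only [hL, List.mem_map, List.mem_flatMap, PySem.List.mem_pyRange_one]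
    constructor
    · rintro ⟨k, ⟨hk0, hk1⟩, rfl⟩
      have hmod := PySem.Int.mod_nonneg k hr
      have hmod' := PySem.Int.mod_lt k hr
      refine ⟨rows - 1 - PySem.Int.mod k rows, ⟨by omega, by omega⟩,
              PySem.Int.floordiv k rows, ?_, ?_⟩
      · rw [PySem.Int.floordiv_eq_ediv_of_pos hr]
        refine ⟨Int.ediv_nonneg hk0 (by omega), ?_⟩
        rw [Int.ediv_lt_iff_lt_mul hr, mul_comm cols rows]
        omega
      · have hk : PySem.Int.floordiv k rows * rows + (rows - 1 - (rows - 1 - PySem.Int.mod k rows)) = k := by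
          have := PySem.Int.floordiv_mul_add_mod k rows
          omega
        rw [hk]
        unfold pvB_cell
        congr 3
    · rintro ⟨r, hrm, c, hcm, rfl⟩
      refine ⟨c * rows + (rows - 1 - r), ⟨by nlinarith, ?_⟩, ?_⟩
      · have h1 : (c + 1) * rows ≤ cols * rows :=
          mul_le_mul_of_nonneg_right (by omega) (by omega)
        nlinarith
      · have m1 : PySem.Int.mod (c * rows + (rows - 1 - r)) rows = rows - 1 - r :=
          pv_mod_key rows c _ hr (by omega) (by omega)
        have d1 : PySem.Int.floordiv (c * rows + (rows - 1 - r)) rows = c :=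
          pv_div_key rows c _ hr (by omega) (by omega)
        unfold pvB_cell
        rw [m1, d1]
        congr 3
        omega
  · rw [hL, List.pairwise_map]
    exact PySem.List.pairwise_lt_pyRange_one 0 (rows * cols)

-- final state of B's fused loop
theorem pv_B_fold (matrix : List (List String)) (rows n : Int) (hn : 0 ≤ n)
    (cellL : List String) (hcell : cellL = (PySem.List.pyRange 0 n 1).map (pvB_cell matrix rows)) :
    ((PySem.List.pyRange 0 n 1).foldl (pvB_step matrix rows)
        (([] : List String), (none : Option Int))).1 = pvEmit cellL 0 none := by
  have hlen : PySem.List.len cellL = n := by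
    rw [hcell]
    simp [PySem.List.len_eq, PySem.List.length_pyRange_one]
    omega
  have henum : PySem.List.enumerate cellL 0
      = (PySem.List.pyRange 0 n 1).map (fun j => (j, PySem.List.pyGetD cellL j "")) := by
    rw [PySem.List.enumerate_eq_map_pyRange (d := ""), hlen]
  have hmain := pvB_enum_fold cellL 0 [] none
  rw [henum, List.foldl_map] at hmain
  have h1 : (PySem.List.pyRange 0 n 1).foldl (pvB_step matrix rows)
        (([] : List String), (none : Option Int))
      = (PySem.List.pyRange 0 n 1).foldl
          (fun (st : List String × Option Int) (j : Int) =>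
            if pvWrap (PySem.List.pyGetD cellL j "") = "" then st
            else
              (st.1 ++ [pvWrap (PySem.List.pyGetD cellL j "") ++
                  PySem.Int.toStr (match st.2 with | none => j | some q => j - q)],
               some j)) (([] : List String), (none : Option Int)) := by
    refine PySem.List.foldl_congr_mem _ _ _ _ ?_
    intro st j hj
    rw [PySem.List.mem_pyRange_one] at hj
    have hg : PySem.List.pyGetD cellL j "" = pvB_cell matrix rows j := by
      rw [hcell]
      exact PySem.List.pyGetD_map_pyRange_of_nonneg _ _ _ _ hj.1 hj.2
    rw [hg]
    by_cases h : pvWrap (pvB_cell matrix rows j) = "" <;> simp [pvB_step, h]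
  rw [h1, hmain]
  simp

-- A's positions pipeline computes pvPos of the direct-read char list
theorem pv_A_positions (matrix : List (List String)) (hne : matrix ≠ []) :
    pvA_positions matrix
    = pvPos ((PySem.List.pyRange 0
          ((matrix.length : Int) * ((PySem.List.pyGetD matrix 0 []).length : Int)) 1).map
            (pvB_cell matrix (matrix.length : Int))) 0 := by
  unfold pvA_positions
  rw [pv_sorted_elements matrix hne, List.map_map]
  have hcomp : ((fun (e : Int × String) => e.2) ∘
      (fun k => (k, pvB_cell matrix (matrix.length : Int) k))) = pvB_cell matrix (matrix.length : Int) := by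
    funext k; rfl
  rw [hcomp]
  have hfun : (fun (acc : List (String × Int)) (p : Int × String) =>
      let i := pvWrap p.2
      if i ≠ "" then acc ++ [(i, p.1)] else acc)
      = (fun acc (p : Int × String) =>
          if pvWrap p.2 = "" then acc else acc ++ [(pvWrap p.2, p.1)]) := by
    funext acc p
    by_cases h : pvWrap p.2 = "" <;> simp [h]
  rw [hfun, pvA_pos_fold, List.nil_append]

theorem pv_main (matrix : List (List String)) (hne : matrix ≠ []) :
    create_position_sequence matrix = create_position_sequence_alt matrix := by
  simp only [create_position_sequence, create_position_sequence_alt]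
  set rows : Int := (matrix.length : Int) with hrows
  set cols : Int := ((PySem.List.pyGetD matrix 0 []).length : Int) with hcols
  set cellL : List String := (PySem.List.pyRange 0 (rows * cols) 1).map (pvB_cell matrix rows)
    with hcell
  have hn : (0 : Int) ≤ rows * cols := mul_nonneg (by omega) (by omega)
  rw [pv_B_fold matrix rows (rows * cols) hn cellL hcell]
  rw [pv_A_positions matrix hne]
  rw [PySem.List.sorted_eq_self_of_pairwise _ _ (pvPos_pairwise _ 0)]
  rw [pvEmit_eq_render]
  cases hP : pvPos cellL 0 with
  | nil => simp [pvRender]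
  | cons p t =>
    simp only [List.isEmpty_cons]
    rw [if_neg (by decide : ¬(false = true)), PySem.List.pyGetD_zero_cons, PySem.List.foldl_append_singleton_eq_map]
    have hrange : PySem.List.pyRange 1 (((p :: t).length : Nat) : Int) 1
        = (List.range t.length).map (fun (k : Nat) => (1 : Int) + (k : Int)) := by
      rw [PySem.List.pyRange_one]
      congr 1
      simp
    rw [hrange, List.map_map]
    have hmap : (List.range t.length).map ((fun i =>
          (PySem.List.pyGetD (p :: t) i ("", 0)).1 ++
          PySem.Int.toStr ((PySem.List.pyGetD (p :: t) i ("", 0)).2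
            - (PySem.List.pyGetD (p :: t) (i - 1) ("", 0)).2)) ∘ (fun (k : Nat) => (1 : Int) + (k : Int)))
        = (List.range t.length).map (fun k =>
            ((p :: t).getD (k + 1) ("", 0)).1 ++
            PySem.Int.toStr (((p :: t).getD (k + 1) ("", 0)).2 - ((p :: t).getD k ("", 0)).2)) := by
      refine List.map_congr_left ?_
      intro k _
      have e1 : (1 : Int) + (k : Int) = ((k + 1 : Nat) : Int) := by push_cast; ring
      simp only [Function.comp_apply, e1, PySem.List.pyGetD_natCast]
      simp [List.getD]
    rw [hmap, pvChain ("", 0) t p]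
    rfl

-- ===== VERDICT (by name: the statement is the Claim_ definition above) =====
theorem create_position_sequence_spec : Claim_equal_create_position_sequence := by
  intro matrix _hdom hpre
  unfold Spec_create_position_sequence
  exact pv_main matrix hpre.1
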